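-- pv_equiv track=rewrite | github.com/b4rt4s/Over-The-Air-Signatures-Authentication | features-extracting/plotSignature.py | split_points
-- ===== SOURCE A (Python) =====
-- def split_points(xy_list, num_parts):
--     N = len(xy_list)
--     base_size = N // num_parts
--     remainder = N % num_parts
--     sublists = []
--     start = 0
--
--     for i in range(num_parts):
--         end = start + base_size
--         if i < remainder:
--             end += 1
--         sublists.append(xy_list[start:end])
--         start = end
--     return sublists
-- ===== SOURCE B (Python) =====
-- def split_points(xy_list, num_parts):
--     it = iter(xy_list)
--     remaining = len(xy_list)
--     parts = []
--     for parts_left in range(num_parts, 0, -1):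
--         take = -(-remaining // parts_left)  # ceil division
--         parts.append([next(it) for _ in range(take)])
--         remaining -= take
--     return parts
-- ===== Notes on version B (the rewrite author's own statement) =====
-- stated objective: alternative
-- what changed: B never computes base size or remainder and never slices with a running index: it consumes the list through an iterator, greedily pulling ceil(remaining/parts_left) elements per part while counting parts down.
import Mathlib
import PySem

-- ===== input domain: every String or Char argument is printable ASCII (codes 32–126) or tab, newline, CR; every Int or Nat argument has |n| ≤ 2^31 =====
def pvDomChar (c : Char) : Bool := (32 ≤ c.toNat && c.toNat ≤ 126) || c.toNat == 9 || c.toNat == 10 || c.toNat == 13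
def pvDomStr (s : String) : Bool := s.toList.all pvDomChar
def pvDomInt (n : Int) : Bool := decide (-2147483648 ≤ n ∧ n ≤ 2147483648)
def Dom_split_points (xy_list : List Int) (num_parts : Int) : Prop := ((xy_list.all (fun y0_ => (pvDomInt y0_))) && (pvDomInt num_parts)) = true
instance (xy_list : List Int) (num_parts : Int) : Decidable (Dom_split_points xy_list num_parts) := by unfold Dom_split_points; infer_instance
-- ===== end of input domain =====

-- B never computes base size or remainder and never slices with a running index: it consumes
-- the list through an iterator, pulling ceil(remaining/parts_left) elements per part while
-- counting parts down (alternative decomposition).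

-- ===== PORT A =====
def split_points (xy_list : List Int) (num_parts : Int) : List (List Int) :=
  let N : Int := xy_list.length
  let base_size := PySem.Int.floordiv N num_parts
  let remainder := PySem.Int.mod N num_parts
  ((PySem.List.pyRange 0 num_parts 1).foldl
    (fun (st : List (List Int) × Int) i =>
      let e := st.2 + base_size + (if i < remainder then (1 : Int) else 0)
      (st.1 ++ [PySem.List.slice xy_list (some st.2) (some e)], e))
    ([], 0)).1

-- ===== PORT B =====
-- Source B's loop `for parts_left in range(num_parts, 0, -1)` as a count-down recursion; the
-- iterator is the not-yet-consumed suffix, `[next(it) for _ in range(take)]` is `take`/`drop`.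
def pvPeelB (it : List Int) (remaining : Int) : Nat → List (List Int)
  | 0 => []
  | parts_left + 1 =>
    let take := -(PySem.Int.floordiv (-remaining) ((parts_left : Int) + 1))  -- ceil division
    it.take take.toNat :: pvPeelB (it.drop take.toNat) (remaining - take) parts_left

def split_points_alt (xy_list : List Int) (num_parts : Int) : List (List Int) :=
  pvPeelB xy_list (xy_list.length : Int) num_parts.toNat

-- ===== PRECONDITION & SPEC =====
-- Pre_ excludes exactly num_parts = 0, where Python A raises ZeroDivisionError.
def Pre_split_points (xy_list : List Int) (num_parts : Int) : Prop := num_parts ≠ 0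
instance (xy_list : List Int) (num_parts : Int) : Decidable (Pre_split_points xy_list num_parts) := by unfold Pre_split_points; infer_instance
def pvWitness_split_points : List Int × Int := ([1, 2, 3, 4, 5], 2)

def Spec_split_points (xy_list : List Int) (num_parts : Int) (out : List (List Int)) : Prop := out = split_points_alt xy_list num_parts
instance (xy_list : List Int) (num_parts : Int) (out : List (List Int)) : Decidable (Spec_split_points xy_list num_parts out) := by unfold Spec_split_points; infer_instance

-- ===== CLAIM (what is proved, stated in full; the proofs are below) =====
def Claim_equal_split_points : Prop := ∀ (xy_list : List Int) (num_parts : Int), Dom_split_points xy_list num_parts → Pre_split_points xy_list num_parts → Spec_split_points xy_list num_parts (split_points xy_list num_parts)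

-- ===== LEMMAS AND PROOFS =====

-- pvBound b r k = start index of A's part k.
def pvBound (b r : Int) : Nat → Int
  | 0 => 0
  | k + 1 => pvBound b r k + b + (if (k : Int) < r then 1 else 0)

theorem pvBound_eq (b r : Int) (hr : 0 ≤ r) (k : Nat) :
    pvBound b r k = b * k + min (k : Int) r := by
  induction k with
  | zero => simp [pvBound]; omega
  | succ m ih =>
    simp only [pvBound, ih]
    have hring : b * ((m : Int) + 1) = b * (m : Int) + b := by ring
    push_cast
    by_cases h : (m : Int) < r
    · rw [if_pos h, min_eq_left (by omega : (m : Int) ≤ r),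
          min_eq_left (by omega : (m : Int) + 1 ≤ r)]
      linarith
    · rw [if_neg h, min_eq_right (by omega : r ≤ (m : Int)),
          min_eq_right (by omega : r ≤ (m : Int) + 1)]
      linarith

theorem pvBound_nonneg (b r : Int) (hb : 0 ≤ b) (k : Nat) : 0 ≤ pvBound b r k := by
  induction k with
  | zero => simp [pvBound]
  | succ m ih =>
    simp only [pvBound]
    by_cases h : (m : Int) < r <;> simp [h] <;> linarith

-- shifting a slice window by c equals slicing the c-dropped list
theorem pvSliceShift (xs : List Int) (c p q : Int) (hc : 0 ≤ c) (hp : 0 ≤ p) (hq : 0 ≤ q) :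
    PySem.List.slice xs (some (c + p)) (some (c + q)) =
      PySem.List.slice (xs.drop c.toNat) (some p) (some q) := by
  rw [PySem.List.slice_toNat xs (by omega) (by omega),
      PySem.List.slice_toNat (xs.drop c.toNat) hp hq, List.drop_drop]
  have hcount : (c + q).toNat - (c + p).toNat = q.toNat - p.toNat := by omega
  have hidx : (c + p).toNat = c.toNat + p.toNat := by omega
  rw [hcount, hidx]

-- A's fold over range(n) computes (slices between consecutive bounds, final bound).
theorem pvFoldA (xs : List Int) (b r : Int) (n : Nat) :
    ((PySem.List.pyRange 0 (n : Int) 1).foldl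
      (fun (st : List (List Int) × Int) i =>
        let e := st.2 + b + (if i < r then (1 : Int) else 0)
        (st.1 ++ [PySem.List.slice xs (some st.2) (some e)], e))
      ([], 0))
    = ((List.range n).map (fun k => PySem.List.slice xs (some (pvBound b r k)) (some (pvBound b r (k + 1)))),
       pvBound b r n) := by
  induction n with
  | zero => simp [PySem.List.pyRange_one_eq_nil, pvBound]
  | succ m ih =>
    rw [show ((m + 1 : Nat) : Int) = (m : Int) + 1 by push_cast; ring,
        PySem.List.pyRange_one_succ_right (by positivity), List.foldl_append, ih]
    simp [List.range_succ, pvBound]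

-- main equivalence between A's slice map and B's recursion, by induction on the part count
theorem pvMain (n : Nat) (xs : List Int) :
    (List.range n).map (fun k =>
      PySem.List.slice xs
        (some (pvBound (PySem.Int.floordiv (xs.length : Int) (n : Int)) (PySem.Int.mod (xs.length : Int) (n : Int)) k))
        (some (pvBound (PySem.Int.floordiv (xs.length : Int) (n : Int)) (PySem.Int.mod (xs.length : Int) (n : Int)) (k + 1))))
    = pvPeelB xs (xs.length : Int) n := by
  induction n generalizing xs with
  | zero => simp [pvPeelB]
  | succ m ih =>
    have hnpos : (0 : Int) < ((m + 1 : Nat) : Int) := by positivity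
    set N : Int := (xs.length : Int) with hN
    have hN0 : 0 ≤ N := by positivity
    set b := PySem.Int.floordiv N ((m + 1 : Nat) : Int) with hb
    set r := PySem.Int.mod N ((m + 1 : Nat) : Int) with hr
    have hbr : b * ((m + 1 : Nat) : Int) + r = N := PySem.Int.floordiv_mul_add_mod N _
    have hr0 : 0 ≤ r := PySem.Int.mod_nonneg N hnpos
    have hrlt : r < ((m + 1 : Nat) : Int) := PySem.Int.mod_lt N hnpos
    push_cast at hbr hrlt
    have hring : b * ((m : Int) + 1) = b * (m : Int) + b := by ring
    have hb0 : 0 ≤ b := by nlinarith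
    have hbm0 : 0 ≤ b * (m : Int) := mul_nonneg hb0 (by positivity)
    set cut := -(PySem.Int.floordiv (-N) ((m + 1 : Nat) : Int)) with hcut
    have hcut' : cut = -(PySem.Int.floordiv (-N) ((m : Int) + 1)) := by
      rw [hcut]; norm_cast
    have hcutval : cut = b + min 1 r := by
      rw [hcut', PySem.Int.neg_floordiv_neg_eq_iff_of_pos (by positivity)]
      by_cases h1 : (0 : Int) < r
      · rw [min_eq_left (by omega : (1 : Int) ≤ r)]
        have e1 : (b + 1 - 1) * ((m : Int) + 1) = b * (m : Int) + b := by ring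
        have e2 : (b + 1) * ((m : Int) + 1) = b * (m : Int) + b + (m : Int) + 1 := by ring
        exact ⟨by linarith, by linarith⟩
      · have hre : r = 0 := by omega
        rw [min_eq_right (by omega : r ≤ (1 : Int))]
        have e1 : (b + r - 1) * ((m : Int) + 1) = b * (m : Int) + b + r * (m : Int) + r - (m : Int) - 1 := by ring
        have e2 : (b + r) * ((m : Int) + 1) = b * (m : Int) + b + r * (m : Int) + r := by ring
        have e3 : r * (m : Int) = 0 := by rw [hre]; ring
        exact ⟨by linarith, by linarith⟩
    have hcut0 : 0 ≤ cut := by rw [hcutval]; omega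
    have hcutN : cut ≤ N := by
      rw [hcutval]
      have := min_le_right (1 : Int) r
      linarith
    -- unfold B one step
    rw [show pvPeelB xs N (m + 1) =
          xs.take cut.toNat :: pvPeelB (xs.drop cut.toNat) (N - cut) m by
        simp only [pvPeelB]; rw [← hcut']]
    -- the tail list and its division parameters
    set xs' := xs.drop cut.toNat with hxs'
    have hlen' : (xs'.length : Int) = N - cut := by
      rw [hxs', List.length_drop]; omega
    set b' := PySem.Int.floordiv (xs'.length : Int) ((m : Nat) : Int) with hb'
    set r' := PySem.Int.mod (xs'.length : Int) ((m : Nat) : Int) with hr'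
    -- values of the peeled list's division parameters, when parts remain
    have hpack : 0 < m → b' = b ∧ r' = r - min 1 r := by
      intro hm
      have hmpos : (0 : Int) < ((m : Nat) : Int) := by exact_mod_cast hm
      have hm1 : (1 : Int) ≤ (m : Int) := by exact_mod_cast hm
      have hN'val : (xs'.length : Int) = r - min 1 r + ((m : Int)) * b := by
        have := min_le_right (1 : Int) r
        rw [hlen', hcutval]; linarith [hring, hbr]
      have hs0 : 0 ≤ r - min 1 r := by omega
      have hslt : r - min 1 r < (m : Int) := by omega
      constructor
      · rw [hb', hN'val, PySem.Int.floordiv_eq_ediv_of_pos hmpos,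
            Int.add_mul_ediv_left _ _ (ne_of_gt hmpos),
            Int.ediv_eq_zero_of_lt hs0 hslt]
        omega
      · rw [hr', hN'val, PySem.Int.mod_eq_emod_of_pos hmpos,
            Int.add_mul_emod_self_left, Int.emod_eq_of_lt hs0 hslt]
    -- boundary shift: A's (j+1)-st bound is cut + the j-th bound of the peeled list
    have hshift : 0 < m → ∀ j : Nat, pvBound b r (j + 1) = cut + pvBound b' r' j := by
      intro hm j
      obtain ⟨hb'val, hr'val⟩ := hpack hm
      have hr'0 : 0 ≤ r' := by omega
      rw [pvBound_eq b r hr0 (j + 1), pvBound_eq b' r' hr'0 j, hb'val, hr'val, hcutval]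
      push_cast
      rw [show min ((j : Int) + 1) r = min 1 r + min (j : Int) (r - min 1 r) by omega]
      ring
    -- split off the first part and rewrite the tail pointwise
    have hfirst : PySem.List.slice xs (some (pvBound b r 0)) (some (pvBound b r 1)) =
        xs.take cut.toNat := by
      have h1 : pvBound b r 1 = cut := by
        rw [pvBound_eq b r hr0 1, hcutval]; push_cast; omega
      rw [show pvBound b r 0 = 0 from rfl, h1, PySem.List.slice_zero_start,
          PySem.List.slice_to xs hcut0]
    rw [List.range_succ_eq_map, List.map_cons, List.map_map, hfirst]
    congr 1
    rw [← hlen', ← ih xs', ← hb', ← hr']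
    apply List.map_congr_left
    intro k hk
    have hk' : k < m := List.mem_range.mp hk
    have hm : 0 < m := by omega
    have hb'0 : 0 ≤ b' := by rw [(hpack hm).1]; exact hb0
    simp only [Function.comp_apply]
    rw [show Nat.succ k = k + 1 from rfl, hshift hm k,
        show k + 1 + 1 = (k + 1) + 1 from rfl, hshift hm (k + 1), hxs']
    exact pvSliceShift xs cut _ _ hcut0 (pvBound_nonneg b' r' hb'0 k)
      (pvBound_nonneg b' r' hb'0 (k + 1))

theorem split_points_eq (xs : List Int) (np : Int) (h : np ≠ 0) :
    split_points xs np = split_points_alt xs np := by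
  by_cases hneg : np ≤ 0
  · unfold split_points split_points_alt
    rw [show np.toNat = 0 by omega]
    simp [PySem.List.pyRange_one_eq_nil hneg, pvPeelB]
  · have hpos : 0 < np := by omega
    obtain ⟨n, rfl⟩ : ∃ n : Nat, np = (n : Int) := ⟨np.toNat, (Int.toNat_of_nonneg (by omega)).symm⟩
    unfold split_points split_points_alt
    rw [Int.toNat_natCast]
    dsimp only
    rw [pvFoldA]
    exact pvMain n xs

-- ===== VERDICT (by name: the statement is the Claim_ definition above) =====
theorem split_points_spec : Claim_equal_split_points := by
  intro xs np _ hpre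
  unfold Spec_split_points
  exact split_points_eq xs np hpre
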